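-- pv_equiv track=rewrite | github.com/deekb/VEX-3773P-2025-2026 | VEXLib/Util/__init__.py | quote_field
-- ===== SOURCE A (Python) =====
-- def quote_field(s):
--     ONE_DOUBLE_QUOTE = '"'
--     TWO_DOUBLE_QUOTES = ONE_DOUBLE_QUOTE * 2
--     if s is None:
--         return ""
--     if not isinstance(s, str):
--         s = str(s)
--     if any([bad_char in s for bad_char in [",", ONE_DOUBLE_QUOTE, "\n", "\r", "\t"]]):
--         return ONE_DOUBLE_QUOTE + s.replace(ONE_DOUBLE_QUOTE, TWO_DOUBLE_QUOTES) + ONE_DOUBLE_QUOTE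
--     return s
-- ===== SOURCE B (Python) =====
-- def quote_field(s):
--     if s is None:
--         return ""
--     if not isinstance(s, str):
--         s = str(s)
--     escaped = []
--     needs_quote = False
--     for ch in s:
--         if ch in ',"\n\r\t':
--             needs_quote = True
--         if ch == '"':
--             escaped.append('""')
--         else:
--             escaped.append(ch)
--     if needs_quote:
--         return '"' + "".join(escaped) + '"'
--     return s
-- ===== Notes on version B (the rewrite author's own statement) =====
-- stated objective: alternative
-- what changed: Replaced A's separate any()-membership scan plus str.replace pass with one fused loop that builds the escaped text and the needs-quote flag in a single traversal.
import Mathlib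
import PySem

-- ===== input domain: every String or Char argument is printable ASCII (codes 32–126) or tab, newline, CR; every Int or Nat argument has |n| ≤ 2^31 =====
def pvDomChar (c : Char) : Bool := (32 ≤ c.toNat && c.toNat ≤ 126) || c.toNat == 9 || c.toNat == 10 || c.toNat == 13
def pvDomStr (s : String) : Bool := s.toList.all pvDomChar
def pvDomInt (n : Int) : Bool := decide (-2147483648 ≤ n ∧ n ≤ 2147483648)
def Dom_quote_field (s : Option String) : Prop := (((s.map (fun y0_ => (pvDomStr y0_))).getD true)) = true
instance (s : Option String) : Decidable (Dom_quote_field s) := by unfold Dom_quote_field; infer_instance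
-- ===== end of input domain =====

-- B fuses A's separate any()-membership scan and str.replace pass into one loop building the
-- escaped text and the needs-quote flag together (objective: alternative decomposition, same cost).

-- ===== PORT A =====
-- A: guard None; the isinstance coercion never fires for a str argument; then the any()-scan
-- over the five special substrings, then '"' + s.replace('"','""') + '"'.
-- String concatenation is done on the char level (exact; Lean's own String append is opaque).
def quote_field (s : Option String) : String :=
  match s with
  | none => ""
  | some s =>
    if ([",", "\"", "\n", "\r", "\t"].map (fun bc => PySem.Str.isIn bc s)).any id then
      String.ofList ('"' :: (PySem.Str.replace s "\"" "\"\"").toList ++ ['"'])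
    else s

-- ===== PORT B =====
-- B: one fold over the characters carrying (escaped, needs_quote); 'ch in ',"\n\r\t'' is
-- single-char membership, ported as list membership in the five special chars.
def quote_field_alt (s : Option String) : String :=
  match s with
  | none => ""
  | some s =>
    let r := s.toList.foldl
      (fun (st : List Char × Bool) ch =>
        (st.1 ++ (if ch == '"' then ['"', '"'] else [ch]),
         st.2 || [',', '"', '\n', '\r', '\t'].contains ch))
      ([], false)
    if r.2 then String.ofList ('"' :: r.1 ++ ['"']) else s

-- ===== PRECONDITION & SPEC =====
def Spec_quote_field (s : Option String) (out : String) : Prop := out = quote_field_alt s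
instance (s : Option String) (out : String) : Decidable (Spec_quote_field s out) := by unfold Spec_quote_field; infer_instance

-- ===== CLAIM (what is proved, stated in full; the proofs are below) =====
def Claim_equal_quote_field : Prop := ∀ (s : Option String), Dom_quote_field s → Spec_quote_field s (quote_field s)

-- ===== LEMMAS AND PROOFS =====

def pvEsc (c : Char) : List Char := if c == '"' then ['"', '"'] else [c]

theorem pv_singleton_infix_iff (c : Char) (l : List Char) : [c] <:+: l ↔ c ∈ l := by
  constructor
  · intro h; exact h.sublist.subset (List.mem_singleton_self c)
  · intro h
    rcases List.append_of_mem h with ⟨a, b, rfl⟩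
    exact ⟨a, b, by simp⟩

theorem pv_cond_eq (s : String) :
    (([",", "\"", "\n", "\r", "\t"].map (fun bc => PySem.Str.isIn bc s)).any id)
      = s.toList.any (fun c => [',', '"', '\n', '\r', '\t'].contains c) := by
  rw [Bool.eq_iff_iff]
  simp only [List.map_cons, List.map_nil, List.any_cons, List.any_nil, id_eq, Bool.or_eq_true,
    Bool.false_eq_true, or_false, PySem.Str.isIn_iff_infix, List.any_eq_true,
    List.contains_eq_mem, decide_eq_true_eq, List.mem_cons, List.not_mem_nil]
  rw [show (",").toList = [','] from rfl, show ("\"").toList = ['"'] from rfl,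
      show ("\n").toList = ['\n'] from rfl, show ("\r").toList = ['\r'] from rfl,
      show ("\t").toList = ['\t'] from rfl]
  simp only [pv_singleton_infix_iff]
  constructor
  · rintro (h | h | h | h | h)
    · exact ⟨',', h, by tauto⟩
    · exact ⟨'"', h, by tauto⟩
    · exact ⟨'\n', h, by tauto⟩
    · exact ⟨'\r', h, by tauto⟩
    · exact ⟨'\t', h, by tauto⟩
  · rintro ⟨c, hc, (rfl | rfl | rfl | rfl | rfl | h)⟩ <;> tauto

theorem pv_go_eq (l : List Char) : ∀ (fuel : Nat) (acc : List Char), l.length ≤ fuel →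
    PySem.Chars.replace.go ['"'] ['"', '"'] fuel l acc = acc.reverse ++ l.flatMap pvEsc := by
  induction l with
  | nil =>
    intro fuel acc _
    cases fuel <;> simp [PySem.Chars.replace.go]
  | cons c t ih =>
    intro fuel acc hf
    cases fuel with
    | zero => simp at hf
    | succ f =>
      simp only [PySem.Chars.replace.go]
      by_cases hc : c = '"'
      · subst hc
        rw [if_pos (by simp [List.isPrefixOf]),
            show List.drop (['"'] : List Char).length ('"' :: t) = t from rfl,
            ih f _ (by simpa using hf)]
        simp [pvEsc]
      · rw [if_neg (by simp [List.isPrefixOf]; exact fun h => hc h.symm)]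
        rw [ih f _ (by simpa using hf)]
        simp [pvEsc, hc]

theorem pv_replace_eq (l : List Char) :
    PySem.Chars.replace l ['"'] ['"', '"'] = l.flatMap pvEsc := by
  rw [PySem.Chars.replace]
  simp only [List.isEmpty_cons, if_false, Bool.false_eq_true]
  simpa using pv_go_eq l l.length [] le_rfl

theorem pv_foldl_pair (l : List Char) : ∀ (acc : List Char) (b : Bool),
    l.foldl
      (fun (st : List Char × Bool) ch =>
        (st.1 ++ (if ch == '"' then ['"', '"'] else [ch]),
         st.2 || [',', '"', '\n', '\r', '\t'].contains ch))
      (acc, b)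
    = (acc ++ l.flatMap pvEsc, b || l.any (fun c => [',', '"', '\n', '\r', '\t'].contains c)) := by
  induction l with
  | nil => intro acc b; simp
  | cons c t ih =>
    intro acc b
    simp only [List.foldl_cons, List.flatMap_cons, List.any_cons, ih]
    simp [pvEsc, Bool.or_assoc]

-- ===== VERDICT (by name: the statement is the Claim_ definition above) =====
theorem quote_field_spec : Claim_equal_quote_field := by
  intro s _
  unfold Spec_quote_field quote_field quote_field_alt
  cases s with
  | none => rfl
  | some s =>
    simp only [pv_foldl_pair s.toList [] false, Bool.false_or, List.nil_append]
    rw [pv_cond_eq s]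
    by_cases h : s.toList.any (fun c => [',', '"', '\n', '\r', '\t'].contains c) = true
    · rw [if_pos h, if_pos h]
      have : (PySem.Str.replace s "\"" "\"\"").toList = s.toList.flatMap pvEsc := by
        rw [PySem.Str.toList_replace]
        exact pv_replace_eq s.toList
      rw [this]
    · rw [if_neg h, if_neg h]
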